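-- pv_equiv track=rewrite | github.com/reuseman/zhou | zhou_results.py | get_classifications
-- ===== SOURCE A (Python) =====
-- def get_classifications(results):
--     tp, tn, fp, fn = 0, 0, 0, 0
--
--     for result in results:
--         tp += result[1]
--         tn += result[2]
--         fp += result[3]
--         fn += result[4]
--
--     return tp, tn, fp, fn
-- ===== SOURCE B (Python) =====
-- def get_classifications(results):
--     cols = list(zip(*results))
--     if not cols:
--         return 0, 0, 0, 0
--     return sum(cols[1]), sum(cols[2]), sum(cols[3]), sum(cols[4])
-- ===== Notes on version B (the rewrite author's own statement) =====
-- stated objective: idiomatic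
-- what changed: Replaces the row-wise four-accumulator loop by transposing with zip(*results) and summing columns 1-4 directly.
import Mathlib
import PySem

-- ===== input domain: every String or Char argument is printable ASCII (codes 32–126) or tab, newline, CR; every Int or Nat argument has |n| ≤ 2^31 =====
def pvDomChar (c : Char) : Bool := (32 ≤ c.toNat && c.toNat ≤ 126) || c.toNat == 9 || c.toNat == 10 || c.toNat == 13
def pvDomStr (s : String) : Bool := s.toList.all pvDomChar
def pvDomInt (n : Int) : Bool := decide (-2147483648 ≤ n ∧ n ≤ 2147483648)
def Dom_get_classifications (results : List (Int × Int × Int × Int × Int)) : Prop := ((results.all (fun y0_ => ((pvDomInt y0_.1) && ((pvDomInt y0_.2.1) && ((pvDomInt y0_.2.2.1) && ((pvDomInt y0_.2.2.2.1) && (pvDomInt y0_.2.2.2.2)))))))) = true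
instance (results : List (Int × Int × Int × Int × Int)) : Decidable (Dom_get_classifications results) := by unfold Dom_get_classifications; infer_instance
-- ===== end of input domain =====

-- B transposes the row list and sums each of columns 1–4, instead of A's row-wise four-accumulator loop (objective: idiomatic).

-- ===== PORT A =====
-- A: tp, tn, fp, fn = 0,0,0,0; for result in results: accumulate result[1..4]; return tuple.
def get_classifications (results : List (Int × Int × Int × Int × Int)) : Int × Int × Int × Int :=
  results.foldl
    (fun acc result =>
      (acc.1 + result.2.1, acc.2.1 + result.2.2.1, acc.2.2.1 + result.2.2.2.1, acc.2.2.2 + result.2.2.2.2))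
    (0, 0, 0, 0)

-- ===== PORT B =====
-- B: cols = list(zip(*results)); if empty return zeros; else sums of columns 1..4.
def get_classifications_alt (results : List (Int × Int × Int × Int × Int)) : Int × Int × Int × Int :=
  match results with
  | [] => (0, 0, 0, 0)
  | _ =>
    ((results.map fun r => r.2.1).sum,
     (results.map fun r => r.2.2.1).sum,
     (results.map fun r => r.2.2.2.1).sum,
     (results.map fun r => r.2.2.2.2).sum)

-- ===== PRECONDITION & SPEC =====
def Spec_get_classifications (results : List (Int × Int × Int × Int × Int)) (out : Int × Int × Int × Int) : Prop := out = get_classifications_alt results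
instance (results : List (Int × Int × Int × Int × Int)) (out : Int × Int × Int × Int) : Decidable (Spec_get_classifications results out) := by unfold Spec_get_classifications; infer_instance

-- ===== CLAIM (what is proved, stated in full; the proofs are below) =====
def Claim_equal_get_classifications : Prop := ∀ (results : List (Int × Int × Int × Int × Int)), Dom_get_classifications results → Spec_get_classifications results (get_classifications results)

-- ===== LEMMAS AND PROOFS =====
-- A's fold from an arbitrary accumulator equals that accumulator plus the four column sums.
theorem get_classifications_foldl (results : List (Int × Int × Int × Int × Int))
    (a b c d : Int) :
    results.foldl
      (fun acc result =>
        (acc.1 + result.2.1, acc.2.1 + result.2.2.1, acc.2.2.1 + result.2.2.2.1, acc.2.2.2 + result.2.2.2.2))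
      (a, b, c, d)
    = (a + (results.map fun r => r.2.1).sum,
       b + (results.map fun r => r.2.2.1).sum,
       c + (results.map fun r => r.2.2.2.1).sum,
       d + (results.map fun r => r.2.2.2.2).sum) := by
  induction results generalizing a b c d with
  | nil => simp
  | cons x xs ih => simp [List.foldl_cons, ih]; ring_nf; simp

-- ===== VERDICT (by name: the statement is the Claim_ definition above) =====
theorem get_classifications_spec : Claim_equal_get_classifications := by
  intro results _
  unfold Spec_get_classifications get_classifications get_classifications_alt
  cases results with
  | nil => rfl
  | cons x xs => rw [get_classifications_foldl]; simp
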